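-- pv_equiv track=rewrite | github.com/robotslacker/testcli | testcli/apiparse.py | APIRequestStringFormatWithPrefix
-- ===== SOURCE A (Python) =====
-- def APIRequestStringFormatWithPrefix(commentAPIScript, outputPrefix=""):
--     bAPIPrefix = 'API> '
--
--     # 如果是完全空行的内容，则直接返回API前缀
--     if len(commentAPIScript) == 0:
--         return bAPIPrefix
--
--     # 把所有的API换行, 第一行加入[API >]， 随后加入[   >]
--     formattedString = None
--     if len(commentAPIScript) >= 1:
--         # 如果原来的内容最后一个字符就是回车换行符，要去掉，否则前端显示就会多一个空格
--         if commentAPIScript[-1] == "\n":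
--             commentAPIScript = commentAPIScript[:-1]
--     commentAPILists = commentAPIScript.split('\n')
--
--     # 拼接字符串
--     for pos in range(0, len(commentAPILists)):
--         if pos == 0:
--             formattedString = outputPrefix + bAPIPrefix + commentAPILists[pos]
--         else:
--             formattedString = \
--                 formattedString + '\n' + outputPrefix + bAPIPrefix + commentAPILists[pos]
--         if len(commentAPILists[pos].strip()) != 0:
--             bAPIPrefix = '   > '
--     return formattedString
-- ===== SOURCE B (Python) =====
-- def APIRequestStringFormatWithPrefix(commentAPIScript, outputPrefix=""):
--     if not commentAPIScript:
--         return 'API> '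
--     if commentAPIScript[-1] == "\n":
--         commentAPIScript = commentAPIScript[:-1]
--     lines = commentAPIScript.split('\n')
--     # index of the first non-blank line (len(lines) if every line is blank)
--     k = next((i for i, line in enumerate(lines) if line.strip()), len(lines))
--     return '\n'.join(outputPrefix + ('API> ' if i <= k else '   > ') + line
--                      for i, line in enumerate(lines))
-- ===== Notes on version B (the rewrite author's own statement) =====
-- stated objective: alternative
-- what changed: Replaces A's stateful fold (a mutable prefix flag and the result rebuilt by repeated concatenation) with a two-phase scan: precompute the index of the first non-blank line, then build the result in a single join over an index comprehension.
import Mathlib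
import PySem

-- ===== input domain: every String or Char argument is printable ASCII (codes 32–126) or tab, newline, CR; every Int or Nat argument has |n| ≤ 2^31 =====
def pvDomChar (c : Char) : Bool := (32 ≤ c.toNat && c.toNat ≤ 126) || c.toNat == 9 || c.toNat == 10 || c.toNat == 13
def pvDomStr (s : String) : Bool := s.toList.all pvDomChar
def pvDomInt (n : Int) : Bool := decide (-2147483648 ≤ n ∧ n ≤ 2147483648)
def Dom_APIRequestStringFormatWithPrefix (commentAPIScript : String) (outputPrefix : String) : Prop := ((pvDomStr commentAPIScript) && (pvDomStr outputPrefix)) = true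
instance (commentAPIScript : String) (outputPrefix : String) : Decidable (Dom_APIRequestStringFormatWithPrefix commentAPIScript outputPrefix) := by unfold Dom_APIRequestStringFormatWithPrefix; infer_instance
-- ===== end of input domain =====

-- B replaces A's stateful prefix-flag fold by precomputing the first non-blank line index and
-- joining an index-based comprehension (alternative decomposition; return value only, no mutation).

-- ===== PORT A =====
-- literal port of A: strip one trailing '\n', split, then a fold over the enumerated lines
-- carrying (formattedString, current prefix), switching the prefix after a non-blank line.
def APIRequestStringFormatWithPrefix (commentAPIScript : String) (outputPrefix : String) : String :=
  if PySem.Chars.len commentAPIScript.toList = 0 then "API> "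
  else
    let cs := if PySem.List.pyGet? commentAPIScript.toList (-1) = some '\n'
              then PySem.List.slice commentAPIScript.toList none (some (-1))
              else commentAPIScript.toList
    let commentAPILists := PySem.Chars.splitOn cs ['\n']
    let r := (PySem.List.enumerate commentAPILists 0).foldl
      (fun (st : List Char × List Char) il =>
        let fs := if il.1 = 0 then outputPrefix.toList ++ st.2 ++ il.2
                  else st.1 ++ ['\n'] ++ outputPrefix.toList ++ st.2 ++ il.2
        let pre := if (PySem.Chars.strip il.2).length ≠ 0 then "   > ".toList else st.2
        (fs, pre))
      ([], "API> ".toList)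
    String.mk r.1

-- ===== PORT B =====
-- literal port of Source B: find the index k of the first line with non-empty strip
-- (length if none), then join 'prefix + (API> if i ≤ k else    > ) + line'.
def APIRequestStringFormatWithPrefix_alt (commentAPIScript : String) (outputPrefix : String) : String :=
  if commentAPIScript.toList.isEmpty then "API> "
  else
    let cs := if PySem.List.pyGet? commentAPIScript.toList (-1) = some '\n'
              then PySem.List.slice commentAPIScript.toList none (some (-1))
              else commentAPIScript.toList
    let lines := PySem.Chars.splitOn cs ['\n']
    let k : Int := (lines.findIdx (fun l => !(PySem.Chars.strip l).isEmpty) : Int)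
    String.mk (PySem.Chars.join ['\n']
      ((PySem.List.enumerate lines 0).map
        (fun il => outputPrefix.toList ++ (if il.1 ≤ k then "API> ".toList else "   > ".toList) ++ il.2)))

-- ===== PRECONDITION & SPEC =====
def Spec_APIRequestStringFormatWithPrefix (commentAPIScript : String) (outputPrefix : String) (out : String) : Prop := out = APIRequestStringFormatWithPrefix_alt commentAPIScript outputPrefix
instance (commentAPIScript : String) (outputPrefix : String) (out : String) : Decidable (Spec_APIRequestStringFormatWithPrefix commentAPIScript outputPrefix out) := by unfold Spec_APIRequestStringFormatWithPrefix; infer_instance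

-- ===== CLAIM (what is proved, stated in full; the proofs are below) =====
def Claim_equal_APIRequestStringFormatWithPrefix : Prop := ∀ (commentAPIScript : String) (outputPrefix : String), Dom_APIRequestStringFormatWithPrefix commentAPIScript outputPrefix → Spec_APIRequestStringFormatWithPrefix commentAPIScript outputPrefix (APIRequestStringFormatWithPrefix commentAPIScript outputPrefix)

-- ===== LEMMAS AND PROOFS =====

-- A's loop body once the first iteration is past (the pos = 0 branch can no longer fire)
def stepA (op : List Char) (st : List Char × List Char) (l : List Char) : List Char × List Char :=
  (st.1 ++ ['\n'] ++ op ++ st.2 ++ l,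
   if (PySem.Chars.strip l).length ≠ 0 then "   > ".toList else st.2)

-- the non-blank test used by both programs, as a Bool
def nb (l : List Char) : Bool := !(PySem.Chars.strip l).isEmpty

-- the tail of the output: line i (counting from s) gets 'API> ' iff i ≤ k, each piece newline-prefixed
def tailPieces (op : List Char) (k : Int) : List (List Char) → Int → List Char
  | [], _ => []
  | l :: t, i => ('\n' :: (op ++ (if i ≤ k then "API> ".toList else "   > ".toList) ++ l)) ++ tailPieces op k t (i + 1)

lemma nb_iff (l : List Char) : nb l = true ↔ (PySem.Chars.strip l).length ≠ 0 := by
  simp [nb, List.length_eq_zero_iff]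

lemma tailPieces_enum (op : List Char) (k : Int) (t : List (List Char)) (s : Int) :
    ((PySem.List.enumerate t s).map
        (fun il => '\n' :: (op ++ (if il.1 ≤ k then "API> ".toList else "   > ".toList) ++ il.2))).flatten
      = tailPieces op k t s := by
  induction t generalizing s with
  | nil => simp [PySem.List.enumerate_nil, tailPieces]
  | cons h t ih => rw [PySem.List.enumerate_cons, List.map_cons, List.flatten_cons, ih, tailPieces]

lemma tailPieces_switched (op : List Char) (k : Int) (t : List (List Char)) (s : Int) (h : k < s) :
    tailPieces op k t s = (t.map (fun l => '\n' :: (op ++ "   > ".toList ++ l))).flatten := by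
  induction t generalizing s with
  | nil => simp [tailPieces]
  | cons x t ih =>
      rw [tailPieces, ih (s + 1) (by omega), if_neg (by omega)]
      simp

lemma tailPieces_shift (op : List Char) (k : Int) (t : List (List Char)) (s : Int) :
    tailPieces op (k + 1) t (s + 1) = tailPieces op k t s := by
  induction t generalizing s with
  | nil => rfl
  | cons x t ih =>
      rw [tailPieces, tailPieces, ih (s + 1)]
      simp only [show (s + 1 ≤ k + 1) ↔ (s ≤ k) from by omega]

-- once the prefix has switched to "   > " it stays, and each line is appended with it
lemma foldA_switched (op : List Char) (t : List (List Char)) (acc : List Char) :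
    t.foldl (stepA op) (acc, "   > ".toList)
      = (acc ++ (t.map (fun l => '\n' :: (op ++ "   > ".toList ++ l))).flatten, "   > ".toList) := by
  induction t generalizing acc with
  | nil => simp
  | cons h t ih =>
      have hstep : stepA op (acc, "   > ".toList) h
          = (acc ++ ['\n'] ++ op ++ "   > ".toList ++ h, "   > ".toList) := by
        unfold stepA; split_ifs <;> rfl
      rw [List.foldl_cons, hstep, ih]
      simp

-- with the prefix still fresh, the fold realises B's per-index choice with threshold findIdx
lemma foldA_fresh (op : List Char) (t : List (List Char)) (acc : List Char) :
    (t.foldl (stepA op) (acc, "API> ".toList)).1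
      = acc ++ tailPieces op ((t.findIdx nb : Nat) : Int) t 0 := by
  induction t generalizing acc with
  | nil => simp [tailPieces]
  | cons h t ih =>
      by_cases hh : nb h = true
      · have hcond : (PySem.Chars.strip h).length ≠ 0 := (nb_iff h).mp hh
        have hidx : (h :: t).findIdx nb = 0 := by simp [List.findIdx_cons, hh]
        rw [hidx, List.foldl_cons]
        have hstep : stepA op (acc, "API> ".toList) h
            = (acc ++ ['\n'] ++ op ++ "API> ".toList ++ h, "   > ".toList) := by
          unfold stepA; rw [if_pos hcond]
        rw [hstep, foldA_switched, tailPieces,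
            ← tailPieces_switched op 0 t (0 + 1) (by omega), if_pos (by omega)]
        simp
      · have hcond : ¬ (PySem.Chars.strip h).length ≠ 0 := fun hc => hh ((nb_iff h).mpr hc)
        have hidx : (h :: t).findIdx nb = t.findIdx nb + 1 := by
          simp [List.findIdx_cons, hh]
        rw [hidx, List.foldl_cons]
        have hstep : stepA op (acc, "API> ".toList) h
            = (acc ++ ['\n'] ++ op ++ "API> ".toList ++ h, "API> ".toList) := by
          unfold stepA; rw [if_neg hcond]
        rw [hstep, ih, tailPieces, if_pos (by positivity)]
        have hcast : (((t.findIdx nb + 1 : Nat)) : Int) = ((t.findIdx nb : Nat) : Int) + 1 := by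
          push_cast; ring
        rw [hcast, tailPieces_shift]
        simp

-- '\n'.join written as head plus newline-prefixed tail pieces
lemma join_newline (a : List Char) (rest : List (List Char)) :
    PySem.Chars.join ['\n'] (a :: rest) = a ++ (rest.map (fun x => '\n' :: x)).flatten := by
  induction rest generalizing a with
  | nil => simp [PySem.Chars.join_singleton]
  | cons b r ih => rw [PySem.Chars.join_cons_cons, ih b]; simp

-- the core equality, over an arbitrary list of lines
lemma main_aux (op : List Char) (lines : List (List Char)) :
    ((PySem.List.enumerate lines 0).foldl
        (fun (st : List Char × List Char) il =>
          ((if il.1 = (0:Int) then op ++ st.2 ++ il.2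
            else st.1 ++ ['\n'] ++ op ++ st.2 ++ il.2),
           if (PySem.Chars.strip il.2).length ≠ 0 then "   > ".toList else st.2))
        ([], "API> ".toList)).1
      = PySem.Chars.join ['\n'] ((PySem.List.enumerate lines 0).map
          (fun il => op ++ (if il.1 ≤ ((lines.findIdx (fun l => !(PySem.Chars.strip l).isEmpty) : Nat) : Int)
                            then "API> ".toList else "   > ".toList) ++ il.2)) := by
  match lines with
  | [] => simp [PySem.List.enumerate_nil, PySem.Chars.join_nil]
  | h :: t =>
      rw [PySem.List.enumerate_cons, List.foldl_cons, List.map_cons]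
      simp only [↓reduceIte]
      have hk0 : ((0:Int) ≤ (((h :: t).findIdx (fun l => !(PySem.Chars.strip l).isEmpty) : Nat) : Int)) := by
        positivity
      rw [if_pos hk0, join_newline]
      have hcongr : (PySem.List.enumerate t (0 + 1)).foldl
            (fun (st : List Char × List Char) il =>
              ((if il.1 = (0:Int) then op ++ st.2 ++ il.2
                else st.1 ++ ['\n'] ++ op ++ st.2 ++ il.2),
               if (PySem.Chars.strip il.2).length ≠ 0 then "   > ".toList else st.2))
            (op ++ "API> ".toList ++ h,
             if (PySem.Chars.strip h).length ≠ 0 then "   > ".toList else "API> ".toList)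
          = (PySem.List.enumerate t (0 + 1)).foldl (fun st il => stepA op st il.2)
            (op ++ "API> ".toList ++ h,
             if (PySem.Chars.strip h).length ≠ 0 then "   > ".toList else "API> ".toList) := by
        apply PySem.List.foldl_congr_mem
        intro st il hil
        rw [PySem.List.mem_enumerate_iff] at hil
        obtain ⟨k, hk, rfl⟩ := hil
        unfold stepA
        rw [if_neg (by push_cast; omega)]
      have hsnd : t.foldl (stepA op)
            (op ++ "API> ".toList ++ h,
             if (PySem.Chars.strip h).length ≠ 0 then "   > ".toList else "API> ".toList)
          = (PySem.List.enumerate t (0 + 1)).foldl (fun st il => stepA op st il.2)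
            (op ++ "API> ".toList ++ h,
             if (PySem.Chars.strip h).length ≠ 0 then "   > ".toList else "API> ".toList) := by
        conv_lhs => rw [← PySem.List.map_snd_enumerate t (0 + 1)]
        rw [List.foldl_map]
      rw [hcongr, ← hsnd, List.map_map]
      have hmap : ((fun x => '\n' :: x) ∘
            (fun il : Int × List Char => op ++ (if il.1 ≤ (((h :: t).findIdx (fun l => !(PySem.Chars.strip l).isEmpty) : Nat) : Int) then "API> ".toList else "   > ".toList) ++ il.2))
          = (fun il : Int × List Char => '\n' :: (op ++ (if il.1 ≤ (((h :: t).findIdx nb : Nat) : Int) then "API> ".toList else "   > ".toList) ++ il.2)) := rfl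
      rw [hmap, tailPieces_enum]
      by_cases hh : nb h = true
      · have hcond : (PySem.Chars.strip h).length ≠ 0 := (nb_iff h).mp hh
        have hidx : (h :: t).findIdx nb = 0 := by simp [List.findIdx_cons, hh]
        rw [if_pos hcond, hidx, foldA_switched,
            ← tailPieces_switched op ((0:Nat):Int) t (0 + 1) (by omega)]
      · have hcond : ¬ (PySem.Chars.strip h).length ≠ 0 := fun hc' => hh ((nb_iff h).mpr hc')
        have hidx : (h :: t).findIdx nb = t.findIdx nb + 1 := by
          simp [List.findIdx_cons, hh]
        rw [if_neg hcond, hidx, foldA_fresh]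
        have hcast : (((t.findIdx nb + 1 : Nat)) : Int) = ((t.findIdx nb : Nat) : Int) + 1 := by
          push_cast; ring
        rw [hcast, tailPieces_shift]

-- ===== VERDICT (by name: the statement is the Claim_ definition above) =====
theorem APIRequestStringFormatWithPrefix_spec : Claim_equal_APIRequestStringFormatWithPrefix := by
  intro c op _
  show APIRequestStringFormatWithPrefix c op = APIRequestStringFormatWithPrefix_alt c op
  unfold APIRequestStringFormatWithPrefix APIRequestStringFormatWithPrefix_alt
  by_cases hc : c.toList.isEmpty
  · rw [if_pos (by simpa [PySem.Chars.len_eq, List.length_eq_zero_iff, List.isEmpty_iff] using hc),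
        if_pos hc]
  · have hlen : ¬ PySem.Chars.len c.toList = 0 := by
      simpa [PySem.Chars.len_eq, List.length_eq_zero_iff, List.isEmpty_iff] using hc
    rw [if_neg hlen, if_neg hc]
    exact congrArg String.mk (main_aux op.toList
      (PySem.Chars.splitOn
        (if PySem.List.pyGet? c.toList (-1) = some '\n'
         then PySem.List.slice c.toList none (some (-1)) else c.toList) ['\n']))
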